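-- pv_equiv track=rewrite | github.com/lollyluann/CDIAC-clust | code/document_clustering_attempt2.py | get_end_directory
-- ===== SOURCE A (Python) =====
-- def get_end_directory(directory):
--     i = 0
--     ct = 0
--     for ch in directory[::-1]:
--         if ch=="/":
--             ct+=1
--             if ct>1:
--                 break
--         i += 1
--     return directory[len(directory)-i:len(directory)-1].replace("/","")
-- ===== SOURCE B (Python) =====
-- def get_end_directory(directory):
--     n = len(directory)
--     last = directory.rfind("/")
--     second = directory.rfind("/", 0, last) if last != -1 else -1
--     return directory[second + 1 : n - 1].replace("/", "")
-- ===== Notes on version B (the rewrite author's own statement) =====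
-- stated objective: simpler
-- what changed: Replaced A's manual reverse-scan loop with its i/ct counters and break by two closed-form str.rfind calls that locate the last and second-to-last slash directly, then one slice.
import Mathlib
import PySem

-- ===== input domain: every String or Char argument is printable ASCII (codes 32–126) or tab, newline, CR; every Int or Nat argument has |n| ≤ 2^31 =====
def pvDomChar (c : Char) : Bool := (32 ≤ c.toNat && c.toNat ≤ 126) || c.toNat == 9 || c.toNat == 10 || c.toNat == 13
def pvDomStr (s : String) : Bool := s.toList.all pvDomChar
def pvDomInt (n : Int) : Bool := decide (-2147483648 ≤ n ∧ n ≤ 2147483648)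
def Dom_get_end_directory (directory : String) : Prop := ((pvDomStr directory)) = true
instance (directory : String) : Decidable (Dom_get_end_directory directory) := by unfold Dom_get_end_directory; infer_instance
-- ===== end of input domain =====

-- B replaces A's manual reverse-scan loop (counter + break) by two closed-form rfind calls; objective: simpler.

-- ===== PORT A =====
-- the 'for ch in directory[::-1]: …' loop with its i/ct state and break
def loopA (i ct : Int) : List Char → Int
  | [] => i
  | c :: rest =>
    if c = '/' then
      if ct + 1 > 1 then i
      else loopA (i + 1) (ct + 1) rest
    else loopA (i + 1) ct rest

def get_end_directory (directory : String) : String :=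
  let l := directory.toList
  let n : Int := l.length
  let i := loopA 0 0 ((PySem.List.slice? l none none (-1)).getD [])   -- directory[::-1]
  -- directory[len(directory)-i : len(directory)-1].replace("/","") on the list side
  String.ofList (PySem.Chars.replace (PySem.List.slice l (some (n - i)) (some (n - 1))) ['/'] [])

-- ===== PORT B =====
-- str.rfind(c[, 0, end]): index of the last occurrence, -1 if absent
def pyRfind (l : List Char) (c : Char) : Int :=
  match l.reverse.findIdx? (· == c) with
  | some j => (l.length : Int) - 1 - j
  | none => -1

def get_end_directory_alt (directory : String) : String :=
  let l := directory.toList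
  let n : Int := l.length
  let last := pyRfind l '/'
  let second := if last ≠ -1 then pyRfind (l.take last.toNat) '/' else -1   -- rfind("/", 0, last)
  String.ofList (PySem.Chars.replace (PySem.List.slice l (some (second + 1)) (some (n - 1))) ['/'] [])

-- ===== PRECONDITION & SPEC =====
def Spec_get_end_directory (directory : String) (out : String) : Prop := out = get_end_directory_alt directory
instance (directory : String) (out : String) : Decidable (Spec_get_end_directory directory out) := by unfold Spec_get_end_directory; infer_instance

-- ===== CLAIM (what is proved, stated in full; the proofs are below) =====
def Claim_equal_get_end_directory : Prop := ∀ (directory : String), Dom_get_end_directory directory → Spec_get_end_directory directory (get_end_directory directory)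

-- ===== LEMMAS AND PROOFS =====

-- index of the first '/' in r, or r.length if none (used only in proofs)
def idx1 (r : List Char) : Nat := (r.findIdx? (· == '/')).getD r.length

theorem loopA_one (r : List Char) (i : Int) : loopA i 1 r = i + (idx1 r : Int) := by
  induction r generalizing i with
  | nil => simp [loopA, idx1]
  | cons c rest ih =>
    by_cases hc : c = '/'
    · simp [loopA, hc, idx1, List.findIdx?_cons]
    · simp only [loopA, ih, idx1, List.findIdx?_cons, beq_iff_eq, hc, if_false]
      cases h : rest.findIdx? (· == '/') <;> simp <;> linarith

theorem loopA_zero (r : List Char) (i : Int) :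
    loopA i 0 r = i + (match r.findIdx? (· == '/') with
      | none => (r.length : Int)
      | some j => (j : Int) + 1 + (idx1 (r.drop (j + 1)) : Int)) := by
  induction r generalizing i with
  | nil => simp [loopA]
  | cons c rest ih =>
    by_cases hc : c = '/'
    · simp only [loopA, List.findIdx?_cons, beq_iff_eq, hc, if_true]
      norm_num
      rw [loopA_one]
      linarith
    · simp only [loopA, ih, List.findIdx?_cons, beq_iff_eq, hc, if_false]
      cases h : rest.findIdx? (· == '/') with
      | none => simp; linarith
      | some j =>
        simp only [Option.map_some]
        have hdrop : List.drop (j + 1 + 1) (c :: rest) = List.drop (j + 1) rest := rfl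
        rw [hdrop]
        push_cast
        linarith

theorem loopA_zero_none {r : List Char} (i : Int) (h : r.findIdx? (· == '/') = none) :
    loopA i 0 r = i + (r.length : Int) := by
  rw [loopA_zero, h]

theorem loopA_zero_some {r : List Char} {j : Nat} (i : Int) (h : r.findIdx? (· == '/') = some j) :
    loopA i 0 r = i + ((j : Int) + 1 + (idx1 (r.drop (j + 1)) : Int)) := by
  rw [loopA_zero, h]

theorem findIdx?_some_lt {p : Char → Bool} {l : List Char} {j : Nat}
    (h : l.findIdx? p = some j) : j < l.length := by
  rw [List.findIdx?_eq_some_iff_findIdx_eq] at h; exact h.1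

-- the two slice starts coincide
theorem start_eq (l : List Char) :
    (l.length : Int) - loopA 0 0 l.reverse =
      (if pyRfind l '/' ≠ -1 then pyRfind (l.take (pyRfind l '/').toNat) '/' else -1) + 1 := by
  cases h : l.reverse.findIdx? (· == '/') with
  | none =>
    rw [loopA_zero_none 0 h]
    simp [pyRfind, h]
  | some j =>
    have hj : j < l.length := by
      have := findIdx?_some_lt h; simpa using this
    have hlast : pyRfind l '/' = (l.length : Int) - 1 - j := by simp [pyRfind, h]
    have hne : pyRfind l '/' ≠ -1 := by rw [hlast]; omega
    have htn : (pyRfind l '/').toNat = l.length - 1 - j := by rw [hlast]; omega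
    have hrev : (l.take (l.length - 1 - j)).reverse = l.reverse.drop (j + 1) := by
      rw [List.reverse_take]
      congr 1
      omega
    have hlen : (l.take (l.length - 1 - j)).length = l.length - 1 - j := by
      simp [List.length_take]; omega
    rw [loopA_zero_some 0 h, if_pos hne, htn]
    cases h2 : (l.reverse.drop (j + 1)).findIdx? (· == '/') with
    | none =>
      have hb : pyRfind (l.take (l.length - 1 - j)) '/' = -1 := by
        simp [pyRfind, hrev, h2]
      rw [hb]
      simp [idx1, h2]
      omega
    | some k =>
      have hb : pyRfind (l.take (l.length - 1 - j)) '/' =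
          ((l.length - 1 - j : Nat) : Int) - 1 - k := by
        simp [pyRfind, hrev, h2, hlen]
      have hk : k < l.length - 1 - j := by
        have := findIdx?_some_lt h2
        simp at this
        omega
      rw [hb]
      simp [idx1, h2]
      omega

-- ===== VERDICT (by name: the statement is the Claim_ definition above) =====
theorem get_end_directory_spec : Claim_equal_get_end_directory := by
  intro directory _
  unfold Spec_get_end_directory get_end_directory get_end_directory_alt
  simp only [PySem.List.slice?_none_none_neg_one, Option.getD_some]
  rw [start_eq]
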